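-- pv_equiv track=rewrite | github.com/arunkhattri/HackerRank | Algorithm/queens_attack.py | vertical_up_moves
-- ===== SOURCE A (Python) =====
-- import math
--
-- def obs_direction(q_r, q_c, obs):
--     """
--     Obstacle in Queen's path
--     Parameters
--     ----------
--     q_r: Queen's row position
--     q_c: Queen's column position
--     b_size: square board size, b_size X b_size
--     obs: marked as obstacles in square board [row, col]
--     Returns
--     -------
--     string, direction (vertical, horizontal, diagonal)
--     """
--     delta_r = abs(q_r - obs[0])
--     delta_c = abs(q_c - obs[1])
--
--     if delta_r == 0 and q_c > obs[1]:
--         return "horizontal_left"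
--     elif delta_r == 0 and q_c < obs[1]:
--         return "horizontal_right"
--     elif delta_c == 0 and q_r > obs[0]:
--         return "vertical_down"
--     elif delta_c == 0 and q_r < obs[0]:
--         return "vertical_up"
--     elif delta_c == delta_r and (q_c - obs[1]) < 0 < (q_r - obs[0]):
--         return "diagonal_bottom_right"
--     elif delta_c == delta_r and (q_c - obs[1]) > 0 < (q_r - obs[0]):
--         return "diagonal_bottom_left"
--     elif delta_c == delta_r and (q_r - obs[0]) < 0 < (q_c - obs[1]):
--         return "diagonal_top_left"
--     elif delta_c == delta_r and (q_r - obs[0]) < 0 > (q_c - obs[1]):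
--         return "diagonal_top_right"
--
-- def vertical_up_moves(obs, q_r, q_c, n):
--     """
--     Possible move counts in vertical up direction
--     Parameters
--     ----------
--     obs: list, obstacles coordinates (row, col)
--     q_r: Queen's row position (y)
--     q_c: Queen's col position (x)
--     Returns
--     -------
--     integer, total possible moves count
--     """
--     vuo = []
--     for ob in obs:
--         if obs_direction(q_r, q_c, ob) == "vertical_up":
--             vuo.append(ob)
--     # nearest to Queen's position
--     if not vuo:
--         return n - q_r
--     else:
--         ed_val = []
--         for coord in vuo:
--             ed_val.append(euclidean_distance(q_r, q_c, coord))
--         effective_obs = vuo[ed_val.index(min(ed_val))]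
--
--         # total possible moves from Queen's position to effective_obs
--         return abs(effective_obs[0] - q_r) - 1
--
-- def euclidean_distance(q_r, q_c, obs):
--     """
--     Obstacle in Queen's path
--     Parameters
--     ----------
--     q_r: Queen's row position
--     q_c: Queen's column position
--     obs: list, marked as obstacles in square board [row, col]
--     Returns
--     -------
--     float, euclidean distance between (q_c, q_r) and obs
--     """
--     return math.sqrt(math.pow((obs[1] - q_c), 2) + math.pow((obs[0] - q_r), 2))
-- ===== SOURCE B (Python) =====
-- def vertical_up_moves(obs, q_r, q_c, n):
--     best = None
--     for ob in obs:
--         if ob[1] == q_c and ob[0] > q_r: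
--             if best is None or ob[0] < best:
--                 best = ob[0]
--     if best is None:
--         return n - q_r
--     return best - q_r - 1
-- ===== Notes on version B (the rewrite author's own statement) =====
-- stated objective: simpler
-- what changed: B replaces A's three-pass pipeline (classify every obstacle by direction string, build a Euclidean-distance list, index the minimum) by a single pass keeping the smallest obstacle row among same-column obstacles strictly above the queen; no distance or direction machinery remains.
import Mathlib
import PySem

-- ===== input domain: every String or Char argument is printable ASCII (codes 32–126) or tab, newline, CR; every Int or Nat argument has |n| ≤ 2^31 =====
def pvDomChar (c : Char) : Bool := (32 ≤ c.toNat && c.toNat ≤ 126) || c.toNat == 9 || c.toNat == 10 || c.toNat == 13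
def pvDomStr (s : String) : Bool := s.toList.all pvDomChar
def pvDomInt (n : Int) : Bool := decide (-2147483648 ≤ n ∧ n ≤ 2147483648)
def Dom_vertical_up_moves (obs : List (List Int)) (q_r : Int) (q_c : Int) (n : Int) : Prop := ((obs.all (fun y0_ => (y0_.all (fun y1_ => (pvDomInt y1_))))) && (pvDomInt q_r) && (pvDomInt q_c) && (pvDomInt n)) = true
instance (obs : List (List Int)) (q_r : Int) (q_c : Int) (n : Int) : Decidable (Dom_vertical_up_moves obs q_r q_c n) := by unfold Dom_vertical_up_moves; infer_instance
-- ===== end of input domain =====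

-- B replaces A's three passes (direction-classify, Euclidean-distance list, index-of-min) by one
-- pass keeping the smallest same-column obstacle row strictly above the queen; objective: simpler.

-- ===== PORT A =====
def obs_direction (q_r : Int) (q_c : Int) (ob : List Int) : Option String :=
  let o0 := PySem.List.pyGetD ob 0 0
  let o1 := PySem.List.pyGetD ob 1 0
  let delta_r := |q_r - o0|
  let delta_c := |q_c - o1|
  if delta_r = 0 ∧ q_c > o1 then some "horizontal_left"
  else if delta_r = 0 ∧ q_c < o1 then some "horizontal_right"
  else if delta_c = 0 ∧ q_r > o0 then some "vertical_down"
  else if delta_c = 0 ∧ q_r < o0 then some "vertical_up"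
  else if delta_c = delta_r ∧ (q_c - o1 < 0 ∧ 0 < q_r - o0) then some "diagonal_bottom_right"
  else if delta_c = delta_r ∧ (q_c - o1 > 0 ∧ 0 < q_r - o0) then some "diagonal_bottom_left"
  else if delta_c = delta_r ∧ (q_r - o0 < 0 ∧ 0 < q_c - o1) then some "diagonal_top_left"
  else if delta_c = delta_r ∧ (q_r - o0 < 0 ∧ 0 > q_c - o1) then some "diagonal_top_right"
  else none

-- math.sqrt(pow(..)+pow(..)) is a float; ported as the exact squared distance (Int): A only uses it
-- through min/index-of-min, and on the admitted inputs (|int| ≤ 2^31) sqrt is strictly increasing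
-- and distinct squared distances of the same-column candidates map to distinct floats, so the
-- selected index is identical.
def euclidean_distance (q_r : Int) (q_c : Int) (ob : List Int) : Int :=
  (PySem.List.pyGetD ob 1 0 - q_c) ^ 2 + (PySem.List.pyGetD ob 0 0 - q_r) ^ 2

def vertical_up_moves (obs : List (List Int)) (q_r : Int) (q_c : Int) (n : Int) : Int :=
  let vuo := obs.foldl (fun acc ob =>
    if obs_direction q_r q_c ob = some "vertical_up" then acc ++ [ob] else acc) []
  if vuo = [] then n - q_r
  else
    let ed_val := vuo.foldl (fun acc coord => acc ++ [euclidean_distance q_r q_c coord]) []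
    match PySem.List.min? ed_val (fun x => x) with
    | none => 0   -- unreachable: ed_val nonempty
    | some m =>
      match PySem.List.index? ed_val m with
      | none => 0 -- unreachable: m ∈ ed_val
      | some i =>
        let effective_obs := PySem.List.pyGetD vuo (i : Int) []
        |PySem.List.pyGetD effective_obs 0 0 - q_r| - 1

-- ===== PORT B =====
def vertical_up_moves_alt (obs : List (List Int)) (q_r : Int) (q_c : Int) (n : Int) : Int :=
  let best := obs.foldl (fun best ob =>
    if PySem.List.pyGetD ob 1 0 = q_c ∧ q_r < PySem.List.pyGetD ob 0 0 then
      match best with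
      | none => some (PySem.List.pyGetD ob 0 0)
      | some b => if PySem.List.pyGetD ob 0 0 < b then some (PySem.List.pyGetD ob 0 0) else some b
    else best) (none : Option Int)
  match best with
  | none => n - q_r
  | some b => b - q_r - 1

-- ===== PRECONDITION & SPEC =====
-- Pre_ excludes exactly the inputs where some obstacle has fewer than two coordinates: there
-- Python A (and B) raise IndexError on ob[0]/ob[1].
def Pre_vertical_up_moves (obs : List (List Int)) (q_r : Int) (q_c : Int) (n : Int) : Prop :=
  ∀ ob ∈ obs, 2 ≤ ob.length
instance (obs : List (List Int)) (q_r : Int) (q_c : Int) (n : Int) : Decidable (Pre_vertical_up_moves obs q_r q_c n) := by unfold Pre_vertical_up_moves; infer_instance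

def pvWitness_vertical_up_moves : List (List Int) × Int × Int × Int := ([[3, 2], [0, 0]], 1, 2, 5)

def Spec_vertical_up_moves (obs : List (List Int)) (q_r : Int) (q_c : Int) (n : Int) (out : Int) : Prop := out = vertical_up_moves_alt obs q_r q_c n
instance (obs : List (List Int)) (q_r : Int) (q_c : Int) (n : Int) (out : Int) : Decidable (Spec_vertical_up_moves obs q_r q_c n out) := by unfold Spec_vertical_up_moves; infer_instance

-- ===== CLAIM (what is proved, stated in full; the proofs are below) =====
def Claim_equal_vertical_up_moves : Prop := ∀ (obs : List (List Int)) (q_r : Int) (q_c : Int) (n : Int), Dom_vertical_up_moves obs q_r q_c n → Pre_vertical_up_moves obs q_r q_c n → Spec_vertical_up_moves obs q_r q_c n (vertical_up_moves obs q_r q_c n)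

-- ===== LEMMAS AND PROOFS =====

-- the candidate predicate: same column, strictly above the queen
def pvP (q_r : Int) (q_c : Int) (ob : List Int) : Bool :=
  decide (PySem.List.pyGetD ob 1 0 = q_c ∧ q_r < PySem.List.pyGetD ob 0 0)

lemma obs_direction_eq_vu (q_r q_c : Int) (ob : List Int) :
    (obs_direction q_r q_c ob = some "vertical_up") ↔ pvP q_r q_c ob = true := by
  unfold obs_direction pvP
  dsimp only
  split_ifs with h1 h2 h3 h4 h5 h6 h7 h8 <;> simp_all <;> omega

-- B's fold equals the running min of the candidate rows
lemma alt_fold_eq (q_r q_c : Int) (l : List (List Int)) (b : Option Int) :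
    l.foldl (fun best ob =>
      if PySem.List.pyGetD ob 1 0 = q_c ∧ q_r < PySem.List.pyGetD ob 0 0 then
        match best with
        | none => some (PySem.List.pyGetD ob 0 0)
        | some b => if PySem.List.pyGetD ob 0 0 < b then some (PySem.List.pyGetD ob 0 0) else some b
      else best) b
    = ((l.filter (pvP q_r q_c)).map (fun ob => PySem.List.pyGetD ob 0 0)).foldl
        (fun best r => match best with
          | none => some r
          | some b => if r < b then some r else some b) b := by
  induction l generalizing b with
  | nil => rfl
  | cons x t ih =>
    by_cases hx : pvP q_r q_c x = true
    · have hx' : PySem.List.pyGetD x 1 0 = q_c ∧ q_r < PySem.List.pyGetD x 0 0 := by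
        simpa [pvP] using hx
      simp [hx, hx', ih]
    · have hx' : ¬ (PySem.List.pyGetD x 1 0 = q_c ∧ q_r < PySem.List.pyGetD x 0 0) := by
        simpa [pvP] using hx
      simp [hx, hx', ih]

-- the option-min fold on a nonempty list is 'some' of the List.foldl min
lemma optmin_fold (r : Int) (t : List Int) :
    (r :: t).foldl (fun best x => match best with
        | none => some x
        | some b => if x < b then some x else some b) (none : Option Int)
    = some (t.foldl min r) := by
  suffices h : ∀ (t : List Int) (b : Int),
      t.foldl (fun best x => match best with
        | none => some x
        | some b => if x < b then some x else some b) (some b) = some (t.foldl min b) by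
    simpa using h t r
  intro t
  induction t with
  | nil => intro b; rfl
  | cons x s ih =>
    intro b
    rw [List.foldl_cons, List.foldl_cons]
    change List.foldl _ (if x < b then some x else some b) s = some (List.foldl min (min b x) s)
    by_cases h : x < b
    · rw [if_pos h, ih, min_eq_right h.le]
    · rw [if_neg h, ih, min_eq_left (not_lt.1 h)]

-- ===== VERDICT =====
theorem vertical_up_moves_spec : Claim_equal_vertical_up_moves := by
  intro obs q_r q_c n _ hpre
  unfold Spec_vertical_up_moves vertical_up_moves vertical_up_moves_alt
  rw [alt_fold_eq]
  have hfilt : obs.foldl (fun acc ob =>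
      if obs_direction q_r q_c ob = some "vertical_up" then acc ++ [ob] else acc) []
      = obs.filter (pvP q_r q_c) := by
    have := PySem.List.foldl_append_if (fun ob => decide (obs_direction q_r q_c ob = some "vertical_up")) (fun ob => ob) obs []
    simp only [decide_eq_true_eq, List.map_id', List.nil_append] at this
    rw [this]
    congr 1
    funext ob
    simp [obs_direction_eq_vu]
  rw [hfilt]
  set vuo := obs.filter (pvP q_r q_c) with hvuo
  have hmem : ∀ ob ∈ vuo, PySem.List.pyGetD ob 1 0 = q_c ∧ q_r < PySem.List.pyGetD ob 0 0 := by
    intro ob hob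
    have := List.of_mem_filter hob
    simpa [pvP] using this
  cases hv : vuo with
  | nil => simp
  | cons v vt =>
    have hne2 : (v :: vt : List (List Int)) ≠ [] := List.cons_ne_nil v vt
    rw [if_neg hne2, List.map_cons, optmin_fold]
    -- rows list and its min
    set row : List Int → Int := fun ob => PySem.List.pyGetD ob 0 0 with hrow
    set M := (vt.map row).foldl min (row v) with hM
    -- A side
    rw [PySem.List.foldl_append_singleton_eq_map (euclidean_distance q_r q_c) (v :: vt) []]
    simp only [List.nil_append]
    set ed_val := (v :: vt).map (euclidean_distance q_r q_c) with hed
    have hedne : ed_val ≠ [] := by simp [hed]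
    cases hmin : PySem.List.min? ed_val (fun x => x) with
    | none => exact absurd ((PySem.List.min?_eq_none_iff _ _).1 hmin) hedne
    | some m =>
      have hmmem : m ∈ ed_val := PySem.List.min?_mem hmin
      have hmmin : ∀ y ∈ ed_val, m ≤ y := by
        intro y hy; simpa using PySem.List.min?_isMin hmin y hy
      cases hidx : PySem.List.index? ed_val m with
      | none =>
        rw [PySem.List.index?_eq_none_iff] at hidx
        exact absurd hmmem hidx
      | some i =>
        obtain ⟨hk, hki, _⟩ := PySem.List.getElem_of_index?_eq_some hidx
        have hlen : ed_val.length = (v :: vt).length := by simp [hed]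
        have hki' : i < (v :: vt).length := hlen ▸ hk
        have heff : PySem.List.pyGetD (v :: vt) (i : Int) [] = (v :: vt)[i]'hki' := by
          simp [PySem.List.pyGetD_natCast, List.getD_eq_getElem?_getD, List.getElem?_eq_getElem hki']
        simp only [hidx, heff]
        set eff := (v :: vt)[i]'hki' with heffd
        have heffmem : eff ∈ (v :: vt) := List.getElem_mem hki'
        have heffP := hmem eff (hv ▸ heffmem)
        have heffed : euclidean_distance q_r q_c eff = m := by
          have : ed_val[i]'hk = euclidean_distance q_r q_c eff := by
            simp only [hed, List.getElem_map, heffd]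
          rw [← hki, this]
        -- each candidate's ed is its squared row offset
        have hedsq : ∀ ob ∈ (v :: vt), euclidean_distance q_r q_c ob = (row ob - q_r) ^ 2 := by
          intro ob hob
          have h := hmem ob (hv ▸ hob)
          simp [euclidean_distance, h.1, hrow]
        -- row eff is ≤ every candidate row
        have hle : ∀ ob ∈ (v :: vt), row eff ≤ row ob := by
          intro ob hob
          have h1 : euclidean_distance q_r q_c eff ≤ euclidean_distance q_r q_c ob := by
            rw [heffed]
            exact hmmin _ (by rw [hed]; exact List.mem_map_of_mem hob)
          rw [hedsq eff heffmem, hedsq ob hob] at h1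
          have hpe := (hmem eff (hv ▸ heffmem)).2
          have hpo := (hmem ob (hv ▸ hob)).2
          nlinarith
        -- M is the min of rows; row eff ∈ rows; also M ≤ row eff and row eff ≤ M
        have hMle : M ≤ row eff := by
          rcases List.mem_cons.1 heffmem with h | h
          · rw [h]
            exact (PySem.List.foldl_min_le (vt.map row) (row v)).1
          · exact (PySem.List.foldl_min_le (vt.map row) (row v)).2 _ (List.mem_map_of_mem h)
        have hleM : row eff ≤ M := by
          rcases PySem.List.foldl_min_mem (vt.map row) (row v) with h | h
          · rw [hM, h]; exact hle v (by simp)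
          · obtain ⟨ob, hob, hobeq⟩ := List.mem_map.1 h
            rw [hM, ← hobeq]
            exact hle ob (by simp [hob])
        have hrweq : row eff = M := le_antisymm hleM hMle
        have h2 := heffP.2
        have habs : |PySem.List.pyGetD eff 0 0 - q_r| = row eff - q_r :=
          abs_of_pos (by omega)
        rw [habs, hrweq]
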